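-- pv_equiv track=rewrite | github.com/fvictorio/uva_online_judge | 10149_Yahtzee/hungarian.py | cover_zeros
-- ===== SOURCE A (Python) =====
-- from copy import copy, deepcopy
--
-- def zeros_below (M, i, j):
--     cant = 0
--     for k in range(i+1, len(M)):
--         if M[k][j] == 0:
--             cant += 1
--     return cant
--
-- def assign_zero_in_row(M, i, cols_assigned):
--     n = len(M)
--     best_zero = -1
--     best_zb = n
--     for j in range(n):
--         if j in cols_assigned: continue
--         if M[i][j] == 0:
--             zb = zeros_below(M, i, j)
--             if zb < best_zb:
--                 best_zero = j
--                 best_zb = zb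
--     return best_zero
--
-- def cover_zeros(M):
--     n = len(M)
--
--     assigned = set([])
--     cols_assigned = set([])
--     rows_assigned = set([])
--     rows_unassigned = set(range(n))
--
--     for i in range(n):
--         zero_to_assign = assign_zero_in_row(M, i, cols_assigned)
--         if zero_to_assign != -1:
--             assigned.add( (i, zero_to_assign) )
--             cols_assigned.add(zero_to_assign)
--             rows_assigned.add(i)
--             rows_unassigned.remove(i)
--
--     marked_rows = copy(rows_unassigned)
--     marked_cols = set([])
--
--     while True:
--         something_marked = False
--
--         for mr in marked_rows:
--             for j, elem_mr in enumerate(M[mr]):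
--                 if elem_mr == 0 and not (j in marked_cols):
--                     marked_cols.add(j)
--                     something_marked = True
--
--         for mc in marked_cols:
--             for i in range(n):
--                 if (i, mc) in assigned and not (i in marked_rows):
--                     marked_rows.add(i)
--                     something_marked = True
--
--         if not something_marked: break
--
--     crossed_rows = set([i for i in range(n) if not (i in marked_rows)])
--     crossed_cols = copy(marked_cols)
--
--     return (crossed_rows, crossed_cols, assigned)
-- ===== SOURCE B (Python) =====
-- def cover_zeros(M):
--     # O(n^2): running per-column zero counts replace the repeated zeros_below
--     # scans, dicts give the assignment in both directions, and the marking is a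
--     # frontier propagation that touches each row and column once.
--     n = len(M)
--     cnt = {}                      # col -> zeros in that column among rows >= current
--     for i in range(n):
--         row = M[i]
--         for j in range(n):
--             if row[j] == 0:
--                 cnt[j] = cnt.get(j, 0) + 1
--     row_of_col = {}               # assigned col -> its row
--     col_of_row = {}               # assigned row -> its col
--     for i in range(n):
--         row = M[i]
--         for j in range(n):
--             if row[j] == 0:
--                 cnt[j] = cnt.get(j, 0) - 1
--         best, best_c = -1, n
--         for j in range(n):
--             if j not in row_of_col and row[j] == 0 and cnt.get(j, 0) < best_c:
--                 best, best_c = j, cnt.get(j, 0)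
--         if best != -1:
--             row_of_col[best] = i
--             col_of_row[i] = best
--     marked_rows = [i for i in range(n) if i not in col_of_row]
--     mr_set = set(marked_rows)
--     marked_cols = []
--     mc_set = set()
--     frontier = list(marked_rows)
--     while frontier:
--         new_cols = []
--         for r in frontier:
--             for j, x in enumerate(M[r]):
--                 if x == 0 and j not in mc_set:
--                     mc_set.add(j)
--                     marked_cols.append(j)
--                     new_cols.append(j)
--         frontier = []
--         for c in new_cols:
--             r2 = row_of_col.get(c)
--             if r2 is not None and r2 not in mr_set:
--                 mr_set.add(r2)
--                 marked_rows.append(r2)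
--                 frontier.append(r2)
--     crossed_rows = set(i for i in range(n) if i not in mr_set)
--     return (crossed_rows, set(marked_cols), set(col_of_row.items()))
-- ===== Notes on version B (the rewrite author's own statement) =====
-- stated objective: faster
-- what changed: Phase 1 replaces the per-candidate zeros_below rescans by a running per-column zero-count dict updated once per row (and dicts in both directions replace the pair-set), and the marking phase replaces the repeated full rescan of all marked rows/columns by a one-pass frontier propagation with a col->row lookup, turning O(n^3) into O(n^2).
import Mathlib
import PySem

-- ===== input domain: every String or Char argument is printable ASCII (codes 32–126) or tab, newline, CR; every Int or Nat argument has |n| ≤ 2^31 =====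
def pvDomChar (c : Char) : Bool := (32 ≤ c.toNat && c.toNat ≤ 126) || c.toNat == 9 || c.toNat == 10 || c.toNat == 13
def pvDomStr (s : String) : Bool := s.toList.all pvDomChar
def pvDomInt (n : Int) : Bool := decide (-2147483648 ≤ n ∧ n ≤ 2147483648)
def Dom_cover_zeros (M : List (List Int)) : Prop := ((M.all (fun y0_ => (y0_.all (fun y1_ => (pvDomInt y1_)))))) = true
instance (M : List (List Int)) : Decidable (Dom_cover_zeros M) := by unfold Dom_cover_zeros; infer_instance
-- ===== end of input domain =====

-- B replaces the repeated zeros_below column rescans by a running per-column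
-- zero-count dict and the repeated full rescans of the marking loop by a
-- one-pass frontier propagation with a col->row dict (O(n^3) -> O(n^2)).

-- ===== PORT A =====
def zeros_below (M : List (List Int)) (i j : Int) : Int :=
  (PySem.List.pyRange (i+1) (PySem.List.len M) 1).foldl
    (fun cant k => if PySem.List.pyGetD (PySem.List.pyGetD M k []) j 0 == 0 then cant + 1 else cant) 0

def assign_zero_in_row (M : List (List Int)) (i : Int) (cols_assigned : PySem.Set Int) : Int :=
  ((PySem.List.pyRange 0 (PySem.List.len M) 1).foldl
    (fun (st : Int × Int) j =>
      if PySem.Set.contains cols_assigned j then st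
      else if PySem.List.pyGetD (PySem.List.pyGetD M i []) j 0 == 0 then
        (let zb := zeros_below M i j
         if zb < st.2 then (j, zb) else st)
      else st) (-1, PySem.List.len M)).1

def assignStepA (M : List (List Int))
    (st : PySem.Set (Int × Int) × PySem.Set Int × PySem.Set Int × PySem.Set Int) (i : Int) :
    PySem.Set (Int × Int) × PySem.Set Int × PySem.Set Int × PySem.Set Int :=
  let z := assign_zero_in_row M i st.2.1
  if z != -1 then
    (PySem.Set.add st.1 (i, z), PySem.Set.add st.2.1 z, PySem.Set.add st.2.2.1 i,
     (PySem.Set.remove? st.2.2.2 i).getD st.2.2.2)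
  else st

def markCols (M : List (List Int)) (mr mc : List Int) : List Int × Bool :=
  mr.foldl (fun acc r =>
    (PySem.List.enumerate (PySem.List.pyGetD M r []) 0).foldl
      (fun (acc : List Int × Bool) je =>
        if je.2 == 0 && !(PySem.Set.contains acc.1 je.1) then (PySem.Set.add acc.1 je.1, true) else acc)
      acc) (mc, false)

def markRows (n : Int) (assigned : PySem.Set (Int × Int)) (mc mr : List Int) : List Int × Bool :=
  mc.foldl (fun acc c =>
    (PySem.List.pyRange 0 n 1).foldl
      (fun (acc : List Int × Bool) i =>
        if PySem.Set.contains assigned (i, c) && !(PySem.Set.contains acc.1 i) then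
          (PySem.Set.add acc.1 i, true)
        else acc)
      acc) (mr, false)

-- fuel for the two while-loops: every non-final pass marks at least one new
-- row or column, so (rows + total entries + 1) passes always reach the break
def coverFuel (M : List (List Int)) : Nat := M.length + (M.map List.length).sum + 1

def loopA (M : List (List Int)) (n : Int) (assigned : PySem.Set (Int × Int)) :
    Nat → List Int → List Int → List Int × List Int
  | 0, mr, mc => (mr, mc)
  | f+1, mr, mc =>
    let p1 := markCols M mr mc
    let p2 := markRows n assigned p1.1 mr
    if p1.2 || p2.2 then loopA M n assigned f p2.1 p1.1 else (p2.1, p1.1)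

def cover_zeros (M : List (List Int)) : List Int × List Int × (List (Int × Int)) :=
  let n := PySem.List.len M
  let st := (PySem.List.pyRange 0 n 1).foldl (assignStepA M)
    (PySem.Set.empty, PySem.Set.empty, PySem.Set.empty, PySem.Set.ofList (PySem.List.pyRange 0 n 1))
  let marked := loopA M n st.1 (coverFuel M) st.2.2.2 PySem.Set.empty
  ((PySem.List.pyRange 0 n 1).filter (fun i => !(PySem.Set.contains marked.1 i)), marked.2, st.1)

-- ===== PORT B =====
def bCounts (M : List (List Int)) (n : Int) : PySem.Dict Int Int :=
  (PySem.List.pyRange 0 n 1).foldl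
    (fun c i =>
      (PySem.List.pyRange 0 n 1).foldl
        (fun c j => if PySem.List.pyGetD (PySem.List.pyGetD M i []) j 0 == 0 then
                      PySem.Dict.modify c j 0 (· + 1) else c) c)
    ⟨[]⟩

def bDecr (row : List Int) (n : Int) (cnt : PySem.Dict Int Int) : PySem.Dict Int Int :=
  (PySem.List.pyRange 0 n 1).foldl
    (fun c j => if PySem.List.pyGetD row j 0 == 0 then PySem.Dict.modify c j 0 (· - 1) else c) cnt

def bBest (row : List Int) (n : Int) (rowOf cnt : PySem.Dict Int Int) : Int :=
  ((PySem.List.pyRange 0 n 1).foldl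
    (fun (st : Int × Int) j =>
      if !(PySem.Dict.contains rowOf j) && (PySem.List.pyGetD row j 0 == 0)
           && decide (PySem.Dict.getD cnt j 0 < st.2) then
        (j, PySem.Dict.getD cnt j 0)
      else st) (-1, n)).1

def assignStepB (M : List (List Int)) (n : Int)
    (st : PySem.Dict Int Int × PySem.Dict Int Int × PySem.Dict Int Int) (i : Int) :
    PySem.Dict Int Int × PySem.Dict Int Int × PySem.Dict Int Int :=
  let row := PySem.List.pyGetD M i []
  let cnt := bDecr row n st.1
  let b := bBest row n st.2.1 cnt
  if b != -1 then (cnt, PySem.Dict.insert st.2.1 b i, PySem.Dict.insert st.2.2 i b)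
  else (cnt, st.2.1, st.2.2)

def bScanRow (M : List (List Int)) (acc : List Int × List Int) (r : Int) : List Int × List Int :=
  (PySem.List.enumerate (PySem.List.pyGetD M r []) 0).foldl
    (fun (acc : List Int × List Int) je =>
      if je.2 == 0 && !(acc.1.contains je.1) then (acc.1 ++ [je.1], acc.2 ++ [je.1]) else acc) acc

def bPullRow (rowOf : PySem.Dict Int Int) (acc : List Int × List Int) (c : Int) : List Int × List Int :=
  match PySem.Dict.get? rowOf c with
  | some r2 => if !(acc.1.contains r2) then (acc.1 ++ [r2], acc.2 ++ [r2]) else acc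
  | none => acc

def loopB (M : List (List Int)) (rowOf : PySem.Dict Int Int) :
    Nat → List Int → List Int → List Int → List Int × List Int
  | 0, mr, mc, _ => (mr, mc)
  | f+1, mr, mc, frontier =>
    if frontier.isEmpty then (mr, mc)
    else
      let p1 := frontier.foldl (bScanRow M) (mc, [])
      let p2 := p1.2.foldl (bPullRow rowOf) (mr, [])
      loopB M rowOf f p2.1 p1.1 p2.2

def cover_zeros_alt (M : List (List Int)) : List Int × List Int × (List (Int × Int)) :=
  let n := PySem.List.len M
  let st := (PySem.List.pyRange 0 n 1).foldl (assignStepB M n) (bCounts M n, ⟨[]⟩, ⟨[]⟩)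
  let mr0 := (PySem.List.pyRange 0 n 1).filter (fun i => !(PySem.Dict.contains st.2.2 i))
  let marked := loopB M st.2.1 (coverFuel M) mr0 [] mr0
  ((PySem.List.pyRange 0 n 1).filter (fun i => !(marked.1.contains i)), marked.2,
   PySem.Dict.items st.2.2)

-- ===== PRECONDITION & SPEC =====
-- The Python A raises IndexError exactly when some row is shorter than the
-- number of rows (every such entry M[i][j], j < n, is eventually read).
def Pre_cover_zeros (M : List (List Int)) : Prop := ∀ row ∈ M, M.length ≤ row.length
instance (M : List (List Int)) : Decidable (Pre_cover_zeros M) := by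
  unfold Pre_cover_zeros; infer_instance

def pvWitness_cover_zeros : List (List Int) := [[0, 1], [2, 0]]

def Spec_cover_zeros (M : List (List Int)) (out : List Int × List Int × (List (Int × Int))) : Prop :=
  out = cover_zeros_alt M
instance (M : List (List Int)) (out : List Int × List Int × (List (Int × Int))) :
    Decidable (Spec_cover_zeros M out) := by unfold Spec_cover_zeros; infer_instance

-- ===== CLAIM (what is proved, stated in full; the proofs are below) =====
def Claim_equal_cover_zeros : Prop :=
  ∀ (M : List (List Int)), Dom_cover_zeros M → Pre_cover_zeros M →
    Spec_cover_zeros M (cover_zeros M)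

-- ===== LEMMAS AND PROOFS =====
-- ===== generic fold lemmas =====
theorem pvFoldlFixed {α β : Type} (f : β → α → β) (acc : β) (l : List α)
    (h : ∀ x ∈ l, f acc x = acc) : l.foldl f acc = acc := by
  induction l with
  | nil => rfl
  | cons a l ih =>
      rw [List.foldl_cons, h a (by simp)]
      exact ih (fun x hx => h x (by simp [hx]))

theorem pvFoldlInv {α β : Type} (f : β → α → β) (P : β → Prop) (l : List α) (acc : β)
    (h0 : P acc) (h : ∀ (b : β) (x : α), x ∈ l → P b → P (f b x)) : P (l.foldl f acc) := by
  induction l generalizing acc with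
  | nil => exact h0
  | cons a l ih =>
      exact ih (f acc a) (h acc a (by simp) h0)
        (fun b x hx hb => h b x (by simp [hx]) hb)

-- ===== the two step shapes of the marking loops =====
def gStep {α : Type} (h : α → Option Int) (acc : List Int × List Int) (x : α) :
    List Int × List Int :=
  match h x with
  | some v => if !(acc.1.contains v) then (acc.1 ++ [v], acc.2 ++ [v]) else acc
  | none => acc

def gStepA {α : Type} (h : α → Option Int) (acc : List Int × Bool) (x : α) :
    List Int × Bool :=
  match h x with
  | some v => if !(acc.1.contains v) then (acc.1 ++ [v], true) else acc
  | none => acc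

def StepS {α : Type} (s : (List Int × List Int) → α → List Int × List Int) : Prop :=
  (∀ m nc x, s (m, nc) x = ((s (m, []) x).1, nc ++ (s (m, []) x).2)) ∧
  (∀ m x, (s (m, []) x).1 = m ++ (s (m, []) x).2)

theorem gStep_stepS {α : Type} (h : α → Option Int) : StepS (gStep h) := by
  constructor
  · intro m nc x
    unfold gStep
    cases h x with
    | none => simp
    | some v => by_cases hv : v ∈ m <;> simp [hv]
  · intro m x
    unfold gStep
    cases h x with
    | none => simp
    | some v => by_cases hv : v ∈ m <;> simp [hv]

theorem stepS_foldl_shift {α : Type} {s : (List Int × List Int) → α → List Int × List Int}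
    (hs : StepS s) (l : List α) :
    ∀ m nc, l.foldl s (m, nc) = ((l.foldl s (m, [])).1, nc ++ (l.foldl s (m, [])).2) := by
  induction l with
  | nil => intro m nc; simp
  | cons x l ih =>
      intro m nc
      cases hp : s (m, []) x with
      | mk m' d =>
          rw [List.foldl_cons, List.foldl_cons, hs.1 m nc x, hs.1 m [] x, hp]
          dsimp only
          rw [List.nil_append, ih m' (nc ++ d), ih m' d]
          simp
theorem stepS_foldl_delta {α : Type} {s : (List Int × List Int) → α → List Int × List Int}
    (hs : StepS s) (l : List α) :
    ∀ m, (l.foldl s (m, [])).1 = m ++ (l.foldl s (m, [])).2 := by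
  induction l with
  | nil => intro m; simp
  | cons x l ih =>
      intro m
      cases hp : s (m, []) x with
      | mk m' d =>
          have h1 : m' = m ++ d := by have := hs.2 m x; rw [hp] at this; exact this
          rw [List.foldl_cons, hp, stepS_foldl_shift hs l m' d, ih m']
          simp [h1]

theorem stepS_foldl_step {α β : Type} {s : (List Int × List Int) → α → List Int × List Int}
    (hs : StepS s) (g : β → List α) : StepS (fun acc b => (g b).foldl s acc) := by
  constructor
  · intro m nc b; exact stepS_foldl_shift hs (g b) m nc
  · intro m b; exact stepS_foldl_delta hs (g b) m

-- relating an A-shaped (flag) step to its B-shaped (delta-list) twin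
def RelAB {α : Type} (sA : (List Int × Bool) → α → List Int × Bool)
    (sB : (List Int × List Int) → α → List Int × List Int) : Prop :=
  ∀ m fl x, sA (m, fl) x = ((sB (m, []) x).1, fl || !(sB (m, []) x).2.isEmpty)

theorem gStepA_rel {α : Type} (h : α → Option Int) : RelAB (gStepA h) (gStep h) := by
  intro m fl x
  unfold gStepA gStep
  cases h x with
  | none => simp
  | some v => by_cases hv : v ∈ m <;> simp [hv]

theorem relAB_foldl {α : Type} {sA : (List Int × Bool) → α → List Int × Bool}
    {sB : (List Int × List Int) → α → List Int × List Int}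
    (hr : RelAB sA sB) (hs : StepS sB) (l : List α) :
    ∀ m fl, l.foldl sA (m, fl) = ((l.foldl sB (m, [])).1, fl || !(l.foldl sB (m, [])).2.isEmpty) := by
  induction l with
  | nil => intro m fl; simp
  | cons x l ih =>
      intro m fl
      cases hp : sB (m, []) x with
      | mk m' d =>
          rw [List.foldl_cons, List.foldl_cons, hr m fl x, hp]
          dsimp only
          rw [ih m' (fl || !d.isEmpty), stepS_foldl_shift hs l m' d]
          dsimp only
          cases fl <;> cases d <;> simp

theorem relAB_foldl_step {α β : Type} {sA : (List Int × Bool) → α → List Int × Bool}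
    {sB : (List Int × List Int) → α → List Int × List Int}
    (hr : RelAB sA sB) (hs : StepS sB) (g : β → List α) :
    RelAB (fun acc b => (g b).foldl sA acc) (fun acc b => (g b).foldl sB acc) := by
  intro m fl b; exact relAB_foldl hr hs (g b) m fl

-- fixed points: a step discovering only already-marked values does nothing
theorem gStepA_fixed {α : Type} (h : α → Option Int) (m : List Int) (fl : Bool) (x : α)
    (hx : ∀ v, h x = some v → v ∈ m) : gStepA h (m, fl) x = (m, fl) := by
  unfold gStepA
  cases hv : h x with
  | none => simp
  | some v => simp [hx v hv]

-- everything a gStep fold is given ends up marked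
theorem gStep_foldl_sat {α : Type} (h : α → Option Int) (l : List α) :
    ∀ (m nc : List Int), ∀ x ∈ l, ∀ v, h x = some v → v ∈ (l.foldl (gStep h) (m, nc)).1 := by
  induction l with
  | nil => intro m nc x hx; simp at hx
  | cons y l ih =>
      intro m nc x hx v hv
      rw [List.foldl_cons]
      cases hp : gStep h (m, nc) y with
      | mk m1 nc1 =>
          have hmono : ∀ w, w ∈ m1 → w ∈ (l.foldl (gStep h) (m1, nc1)).1 := by
            intro w hw
            rw [stepS_foldl_shift (gStep_stepS h) l m1 nc1,
                stepS_foldl_delta (gStep_stepS h) l m1]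
            exact List.mem_append_left _ hw
          rcases List.mem_cons.mp hx with rfl | hxl
          · -- x = y : after its own step, v is in the marked list
            apply hmono
            have : v ∈ m1 := by
              have := hp
              unfold gStep at this
              rw [hv] at this
              by_cases hvm : v ∈ m
              · simp [hvm] at this; rw [← this.1]; exact hvm
              · simp [hvm] at this; rw [← this.1]; simp
            exact this
          · exact ih m1 nc1 x hxl v hv

-- ===== connecting the ports' marking steps to the two step shapes =====
def erow (M : List (List Int)) (r : Int) : List (Int × Int) :=
  PySem.List.enumerate (PySem.List.pyGetD M r []) 0

def hcol : Int × Int → Option Int := fun je => if je.2 == 0 then some je.1 else none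

theorem aColStep_eq : (fun (acc : List Int × Bool) (je : Int × Int) =>
    if je.2 == 0 && !(PySem.Set.contains acc.1 je.1) then (PySem.Set.add acc.1 je.1, true) else acc)
    = gStepA hcol := by
  funext acc je
  unfold gStepA hcol PySem.Set.add PySem.Set.contains
  by_cases h0 : je.2 == 0 <;> by_cases hj : je.1 ∈ acc.1 <;> simp [h0, hj]

theorem bColStep_eq : (fun (acc : List Int × List Int) (je : Int × Int) =>
    if je.2 == 0 && !(acc.1.contains je.1) then (acc.1 ++ [je.1], acc.2 ++ [je.1]) else acc)
    = gStep hcol := by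
  funext acc je
  unfold gStep hcol
  by_cases h0 : je.2 == 0 <;> by_cases hj : je.1 ∈ acc.1 <;> simp [h0, hj]

theorem bScanRow_eq (M : List (List Int)) (acc : List Int × List Int) (r : Int) :
    bScanRow M acc r = (erow M r).foldl (gStep hcol) acc := by
  unfold bScanRow erow
  rw [bColStep_eq]

theorem bPullRow_eq (rowOf : PySem.Dict Int Int) :
    bPullRow rowOf = gStep (PySem.Dict.get? rowOf) := by
  funext acc c
  unfold bPullRow gStep
  cases PySem.Dict.get? rowOf c <;> rfl

theorem markCols_eq (M : List (List Int)) (mr mc : List Int) :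
    markCols M mr mc = mr.foldl (fun acc r => (erow M r).foldl (gStepA hcol) acc) (mc, false) := by
  unfold markCols erow
  rw [aColStep_eq]

theorem stepS_foldl_mono {α : Type} {s : (List Int × List Int) → α → List Int × List Int}
    (hs : StepS s) (l : List α) (m nc : List Int) :
    ∀ w ∈ m, w ∈ (l.foldl s (m, nc)).1 := by
  intro w hw
  rw [stepS_foldl_shift hs l m nc, stepS_foldl_delta hs l m]
  exact List.mem_append_left _ hw

def RowSat (M : List (List Int)) (mc : List Int) (r : Int) : Prop :=
  ∀ je ∈ erow M r, je.2 = 0 → je.1 ∈ mc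

theorem hcol_some {je : Int × Int} {v : Int} (h : hcol je = some v) : v = je.1 ∧ je.2 = 0 := by
  unfold hcol at h
  by_cases h0 : je.2 == 0
  · simp [h0] at h; exact ⟨h.symm, by simpa using h0⟩
  · simp [h0] at h

theorem scanA_fixed (M : List (List Int)) (mc : List Int) (fl : Bool) (r : Int)
    (hr : RowSat M mc r) : (erow M r).foldl (gStepA hcol) (mc, fl) = (mc, fl) := by
  apply pvFoldlFixed
  intro je hje
  apply gStepA_fixed
  intro v hv
  obtain ⟨rfl, h0⟩ := hcol_some hv
  exact hr je hje h0

-- scanning the frontier marks every zero column of every frontier row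
theorem scan_sat (M : List (List Int)) (rows : List Int) :
    ∀ (m nc : List Int), ∀ r ∈ rows,
      RowSat M ((rows.foldl (bScanRow M) (m, nc)).1) r := by
  induction rows with
  | nil => intro m nc r hr; simp at hr
  | cons r0 rows ih =>
      intro m nc r hr je hje h0
      rw [List.foldl_cons]
      cases hp : bScanRow M (m, nc) r0 with
      | mk m1 nc1 =>
          have hsS : StepS (bScanRow M) := by
            have := stepS_foldl_step (gStep_stepS hcol) (fun r => erow M r)
            have he : (fun (acc : List Int × List Int) (r : Int) => (erow M r).foldl (gStep hcol) acc)
                = bScanRow M := by funext acc r; rw [bScanRow_eq]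
            rwa [he] at this
          rcases List.mem_cons.mp hr with rfl | hrl
          · apply stepS_foldl_mono hsS rows m1 nc1
            have : je.1 ∈ (bScanRow M (m, nc) r).1 := by
              rw [bScanRow_eq]
              exact gStep_foldl_sat hcol (erow M r) m nc je hje je.1 (by unfold hcol; simp [h0])
            rwa [hp] at this
          · exact ih m1 nc1 r hrl je hje h0

theorem pull_sat (rowOf : PySem.Dict Int Int) (newc : List Int) (mr nr : List Int) :
    ∀ c ∈ newc, ∀ r2, PySem.Dict.get? rowOf c = some r2 →
      r2 ∈ (newc.foldl (bPullRow rowOf) (mr, nr)).1 := by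
  intro c hc r2 hr2
  rw [bPullRow_eq]
  exact gStep_foldl_sat (PySem.Dict.get? rowOf) newc mr nr c hc r2 hr2

theorem single_match_foldl (P : Int → Bool) (r2 : Int) (l : List Int) :
    l.Nodup → r2 ∈ l → (∀ i, P i = true → i = r2) → P r2 = true →
    ∀ acc : List Int × Bool,
      l.foldl (fun acc i =>
        if P i && !(PySem.Set.contains acc.1 i) then (PySem.Set.add acc.1 i, true) else acc) acc
      = if !(acc.1.contains r2) then (acc.1 ++ [r2], true) else acc := by
  induction l with
  | nil => intro _ hr2; simp at hr2
  | cons a l ih =>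
      intro hnd hr2 honly hP acc
      rw [List.foldl_cons]
      by_cases ha : P a = true
      · have haeq : a = r2 := honly a ha
        subst haeq
        have hanl : a ∉ l := (List.nodup_cons.mp hnd).1
        have hfix : ∀ acc' : List Int × Bool, l.foldl (fun acc i =>
            if P i && !(PySem.Set.contains acc.1 i) then (PySem.Set.add acc.1 i, true) else acc) acc'
            = acc' := by
          intro acc'
          apply pvFoldlFixed
          intro i hi
          have : P i = false := by
            by_contra hPi
            simp at hPi
            exact hanl ((honly i hPi) ▸ hi)
          simp [this]
        by_cases hc : acc.1.contains a = true
        · have hmem : a ∈ acc.1 := List.contains_iff_mem.mp hc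
          have hguard : (P a && !(PySem.Set.contains acc.1 a)) = false := by
            simp [PySem.Set.contains, hmem]
          rw [hguard]
          simp only [if_false, Bool.false_eq_true]
          rw [hfix acc]
          simp [hmem]
        · have hnm : a ∉ acc.1 := fun h => hc (List.contains_iff_mem.mpr h)
          have hguard : (P a && !(PySem.Set.contains acc.1 a)) = true := by
            simp [PySem.Set.contains, ha, hnm]
          rw [hguard]
          simp only [if_true]
          rw [hfix _]
          simp [PySem.Set.add, PySem.Set.contains, hnm]
      · have hr2l : r2 ∈ l := by
          rcases List.mem_cons.mp hr2 with rfl | h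
          · exact absurd hP ha
          · exact h
        have hguard : (P a && !(PySem.Set.contains acc.1 a)) = false := by
          simp [ha]
        rw [hguard]
        simp only [Bool.false_eq_true, if_false]
        exact ih (List.nodup_cons.mp hnd).2 hr2l honly hP acc

theorem aPull_eq (n : Int) (assigned : List (Int × Int)) (rowOf : PySem.Dict Int Int)
    (hassign : ∀ (i c : Int), ((i, c) ∈ assigned ↔ PySem.Dict.get? rowOf c = some i))
    (hrange : ∀ (i c : Int), (i, c) ∈ assigned → i ∈ PySem.List.pyRange 0 n 1) :
    ∀ (c : Int) (acc : List Int × Bool),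
      (PySem.List.pyRange 0 n 1).foldl (fun (acc : List Int × Bool) i =>
        if PySem.Set.contains assigned (i, c) && !(PySem.Set.contains acc.1 i) then
          (PySem.Set.add acc.1 i, true)
        else acc) acc
      = gStepA (PySem.Dict.get? rowOf) acc c := by
  intro c acc
  cases hg : PySem.Dict.get? rowOf c with
  | none =>
      unfold gStepA
      rw [hg]
      apply pvFoldlFixed
      intro i _
      have hni : ¬ ((i, c) ∈ assigned) := by
        intro hm; rw [hassign i c, hg] at hm; simp at hm
      simp [PySem.Set.contains, hni]
  | some r2 =>
      have hmem : (r2, c) ∈ assigned := (hassign r2 c).mpr hg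
      have hr2 : r2 ∈ PySem.List.pyRange 0 n 1 := hrange r2 c hmem
      have honly : ∀ i, PySem.Set.contains assigned (i, c) = true → i = r2 := by
        intro i hi
        have : (i, c) ∈ assigned := by
          simpa [PySem.Set.contains, List.contains_iff_mem] using hi
        have h2 := (hassign i c).mp this
        rw [hg] at h2
        exact (Option.some.inj h2).symm
      have hP : PySem.Set.contains assigned (r2, c) = true := by
        simpa [PySem.Set.contains, List.contains_iff_mem] using hmem
      rw [single_match_foldl (fun i => PySem.Set.contains assigned (i, c)) r2 _
            (PySem.List.nodup_pyRange_one 0 n) hr2 honly hP acc]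
      unfold gStepA
      rw [hg]

theorem markRows_eq (n : Int) (assigned : List (Int × Int)) (rowOf : PySem.Dict Int Int)
    (hassign : ∀ (i c : Int), ((i, c) ∈ assigned ↔ PySem.Dict.get? rowOf c = some i))
    (hrange : ∀ (i c : Int), (i, c) ∈ assigned → i ∈ PySem.List.pyRange 0 n 1)
    (mc mr : List Int) :
    markRows n assigned mc mr = mc.foldl (gStepA (PySem.Dict.get? rowOf)) (mr, false) := by
  unfold markRows
  apply PySem.List.foldl_congr_mem
  intro acc c _
  exact aPull_eq n assigned rowOf hassign hrange c acc

theorem bScanRow_stepS (M : List (List Int)) : StepS (bScanRow M) := by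
  have h := stepS_foldl_step (gStep_stepS hcol) (fun r => erow M r)
  have he : (fun (acc : List Int × List Int) (r : Int) => (erow M r).foldl (gStep hcol) acc)
      = bScanRow M := by funext acc r; rw [bScanRow_eq]
  rwa [he] at h

theorem bScanRows_relAB (M : List (List Int)) :
    RelAB (fun acc r => (erow M r).foldl (gStepA hcol) acc) (bScanRow M) := by
  have h := relAB_foldl_step (gStepA_rel hcol) (gStep_stepS hcol) (fun r => erow M r)
  have he : (fun (acc : List Int × List Int) (r : Int) => (erow M r).foldl (gStep hcol) acc)
      = bScanRow M := by funext acc r; rw [bScanRow_eq]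
  rwa [he] at h

theorem loopB_nil (M : List (List Int)) (rowOf : PySem.Dict Int Int) (f : Nat)
    (mr mc : List Int) : loopB M rowOf f mr mc [] = (mr, mc) := by
  cases f <;> simp [loopB]

theorem rowSat_mono {M : List (List Int)} {mc mc' : List Int} {r : Int}
    (hsub : ∀ x ∈ mc, x ∈ mc') (h : RowSat M mc r) : RowSat M mc' r :=
  fun je hje h0 => hsub je.1 (h je hje h0)

theorem loop_eq (M : List (List Int)) (n : Int) (assigned : List (Int × Int))
    (rowOf : PySem.Dict Int Int)
    (hassign : ∀ (i c : Int), ((i, c) ∈ assigned ↔ PySem.Dict.get? rowOf c = some i))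
    (hrange : ∀ (i c : Int), (i, c) ∈ assigned → i ∈ PySem.List.pyRange 0 n 1) :
    ∀ (f : Nat) (done frontier mc : List Int),
      (∀ r ∈ done, RowSat M mc r) →
      (∀ c ∈ mc, ∀ i, (i, c) ∈ assigned → i ∈ done ++ frontier) →
      loopA M n assigned f (done ++ frontier) mc = loopB M rowOf f (done ++ frontier) mc frontier := by
  intro f
  induction f with
  | zero => intro done frontier mc _ _; simp [loopA, loopB]
  | succ f ih =>
      intro done frontier mc ha hb
      -- the column scan of A over done ++ frontier
      have hmc : markCols M (done ++ frontier) mc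
          = ((frontier.foldl (bScanRow M) (mc, [])).1,
             !(frontier.foldl (bScanRow M) (mc, [])).2.isEmpty) := by
        rw [markCols_eq, List.foldl_append]
        have hdone : done.foldl (fun acc r => (erow M r).foldl (gStepA hcol) acc) (mc, false)
            = (mc, false) := by
          apply pvFoldlFixed
          intro r hr
          exact scanA_fixed M mc false r (ha r hr)
        rw [hdone]
        have := relAB_foldl (bScanRows_relAB M) (bScanRow_stepS M) frontier mc false
        simpa using this
      -- name the scan result
      cases hS : frontier.foldl (bScanRow M) (mc, []) with
      | mk mc' newc =>
          have hmcs : mc' = mc ++ newc := by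
            have := stepS_foldl_delta (bScanRow_stepS M) frontier mc
            rw [hS] at this
            exact this
          rw [hS] at hmc
          -- the row scan of A over mc' = mc ++ newc
          cases hT : newc.foldl (bPullRow rowOf) (done ++ frontier, []) with
          | mk mr' newr =>
              have hmrs : mr' = (done ++ frontier) ++ newr := by
                have h1 := stepS_foldl_delta (by rw [bPullRow_eq]; exact gStep_stepS _ :
                    StepS (bPullRow rowOf)) newc (done ++ frontier)
                rw [hT] at h1
                exact h1
              have hmr : markRows n assigned mc' (done ++ frontier) = (mr', !newr.isEmpty) := by
                rw [markRows_eq n assigned rowOf hassign hrange, hmcs, List.foldl_append]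
                have hold : mc.foldl (gStepA (PySem.Dict.get? rowOf)) (done ++ frontier, false)
                    = (done ++ frontier, false) := by
                  apply pvFoldlFixed
                  intro c hc
                  apply gStepA_fixed
                  intro v hv
                  exact hb c hc v ((hassign v c).mpr hv)
                rw [hold]
                have h2 := relAB_foldl (gStepA_rel (PySem.Dict.get? rowOf))
                    (gStep_stepS (PySem.Dict.get? rowOf)) newc (done ++ frontier) false
                rw [show newc.foldl (gStep (PySem.Dict.get? rowOf)) (done ++ frontier, [])
                      = (mr', newr) by rw [← bPullRow_eq]; exact hT] at h2
                simpa using h2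
              -- unfold one step of both loops
              by_cases hfe : frontier = []
              · subst hfe
                simp at hS
                obtain ⟨h1, h2⟩ := hS
                subst h1; subst h2
                simp at hT
                obtain ⟨h1, h2⟩ := hT
                simp only [loopA, loopB]
                rw [hmc, hmr]
                simp [← h1, ← h2]
              · -- frontier nonempty: B performs the scan/pull
                have hBstep : loopB M rowOf (f+1) (done ++ frontier) mc frontier
                    = loopB M rowOf f mr' mc' newr := by
                  simp only [loopB, List.isEmpty_iff, hfe, if_false]
                  rw [hS]
                  dsimp only
                  rw [hT]
                rw [hBstep]
                simp only [loopA]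
                rw [hmc, hmr]
                dsimp only
                by_cases hnc : newc = []
                · subst hnc
                  simp only [List.foldl_nil] at hT
                  injection hT with h1 h2
                  subst h1
                  subst h2
                  simp [loopB_nil, hmcs]
                · have hncb : (!newc.isEmpty) = true := by
                    simp [hnc]
                  rw [hncb]
                  simp only [Bool.true_or, if_true]
                  have ha' : ∀ r ∈ done ++ frontier, RowSat M (mc ++ newc) r := by
                    intro r hr
                    rcases List.mem_append.mp hr with h | h
                    · exact rowSat_mono (fun x hx => List.mem_append_left _ hx) (ha r h)
                    · have := scan_sat M frontier mc [] r h
                      rw [hS] at this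
                      rwa [hmcs] at this
                  have hb' : ∀ c ∈ mc ++ newc, ∀ i, (i, c) ∈ assigned →
                      i ∈ (done ++ frontier) ++ newr := by
                    intro c hc i hi
                    rcases List.mem_append.mp hc with h | h
                    · exact List.mem_append_left _ (hb c h i hi)
                    · have hget := (hassign i c).mp hi
                      have := pull_sat rowOf newc (done ++ frontier) [] c h i hget
                      rw [hT] at this
                      rwa [hmrs] at this
                  have hrec := ih (done ++ frontier) newr (mc ++ newc) ha' hb'
                  rw [hmrs, hmcs]
                  simpa [List.append_assoc] using hrec

-- ===== phase 1: assignment =====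
def zeroAt (M : List (List Int)) (k j : Int) : Bool :=
  PySem.List.pyGetD (PySem.List.pyGetD M k []) j 0 == 0

theorem zeros_below_eq (M : List (List Int)) (i j : Int) :
    zeros_below M i j
      = (((PySem.List.pyRange (i+1) (PySem.List.len M) 1).countP (fun k => zeroAt M k j) : Nat) : Int) := by
  unfold zeros_below zeroAt
  rw [PySem.List.foldl_count_if]
  simp

theorem getD_foldl_modify_if (p : Int → Bool) (g : Int → Int) :
    ∀ (l : List Int), l.Nodup → ∀ (d : PySem.Dict Int Int) (j : Int),
      (l.foldl (fun c j' => if p j' then PySem.Dict.modify c j' 0 g else c) d).getD j 0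
      = if j ∈ l ∧ p j = true then g (d.getD j 0) else d.getD j 0 := by
  intro l
  induction l with
  | nil => intro _ d j; simp
  | cons a l ih =>
      intro hnd d j
      rw [List.foldl_cons, ih (List.nodup_cons.mp hnd).2]
      by_cases hpa : p a = true
      · simp only [hpa, if_true]
        by_cases hja : j = a
        · subst hja
          have hjl : j ∉ l := (List.nodup_cons.mp hnd).1
          simp [hjl, hpa]
        · simp only [PySem.Dict.getD_modify, if_neg hja]
          simp [List.mem_cons, hja]
      · simp only [Bool.not_eq_true] at hpa
        simp only [hpa, Bool.false_eq_true, if_false]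
        by_cases hja : j = a
        · subst hja; simp [hpa]
        · simp [List.mem_cons, hja]

theorem counts_fold (M : List (List Int)) (n : Int) (j : Int)
    (hj : j ∈ PySem.List.pyRange 0 n 1) :
    ∀ (l : List Int) (d : PySem.Dict Int Int),
      (l.foldl (fun c i => (PySem.List.pyRange 0 n 1).foldl
          (fun c j' => if PySem.List.pyGetD (PySem.List.pyGetD M i []) j' 0 == 0 then
              PySem.Dict.modify c j' 0 (· + 1) else c) c) d).getD j 0
      = d.getD j 0 + ((l.countP (fun i => zeroAt M i j) : Nat) : Int) := by
  intro l
  induction l with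
  | nil => intro d; simp
  | cons i l ih =>
      intro d
      rw [List.foldl_cons, ih]
      rw [getD_foldl_modify_if _ _ _ (PySem.List.nodup_pyRange_one 0 n)]
      rw [List.countP_cons]
      by_cases hz : zeroAt M i j
      · have h2 : PySem.List.pyGetD (PySem.List.pyGetD M i []) j 0 == 0 := hz
        simp [hj, h2, zeroAt]
        try push_cast
        try ring
      · have h2 : ¬ (PySem.List.pyGetD (PySem.List.pyGetD M i []) j 0 == 0) := hz
        simp [hj, h2, zeroAt]
        try omega

theorem bCounts_getD (M : List (List Int)) (n : Int) (j : Int)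
    (hj : j ∈ PySem.List.pyRange 0 n 1) :
    (bCounts M n).getD j 0
      = (((PySem.List.pyRange 0 n 1).countP (fun k => zeroAt M k j) : Nat) : Int) := by
  unfold bCounts
  rw [counts_fold M n j hj]
  have h0 : (PySem.Dict.mk ([] : List (Int × Int))).getD j 0 = 0 := rfl
  rw [h0]
  ring

theorem bDecr_getD (row : List Int) (n : Int) (cnt : PySem.Dict Int Int) (j : Int)
    (hj : j ∈ PySem.List.pyRange 0 n 1) :
    (bDecr row n cnt).getD j 0
      = cnt.getD j 0 - (if PySem.List.pyGetD row j 0 == 0 then 1 else 0) := by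
  unfold bDecr
  rw [getD_foldl_modify_if (fun j' => PySem.List.pyGetD row j' 0 == 0) (· - 1) _
        (PySem.List.nodup_pyRange_one 0 n)]
  by_cases h : PySem.List.pyGetD row j 0 == 0 <;> simp [hj, h]

theorem zb_succ (M : List (List Int)) (t j : Int) (htn : t < PySem.List.len M) :
    zeros_below M t j = zeros_below M (t-1) j - (if zeroAt M t j then 1 else 0) := by
  rw [zeros_below_eq, zeros_below_eq]
  have h1 : t - 1 + 1 = t := by ring
  rw [h1, PySem.List.pyRange_one_cons htn, List.countP_cons]
  by_cases h : zeroAt M t j <;> simp [h]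

theorem best_eq (M : List (List Int)) (t : Int) (cols : PySem.Set Int)
    (rowOf cnt' : PySem.Dict Int Int)
    (hcols : ∀ j : Int, PySem.Set.contains cols j = PySem.Dict.contains rowOf j)
    (hcnt : ∀ j ∈ PySem.List.pyRange 0 (PySem.List.len M) 1,
        cnt'.getD j 0 = zeros_below M t j) :
    assign_zero_in_row M t cols
      = bBest (PySem.List.pyGetD M t []) (PySem.List.len M) rowOf cnt' := by
  unfold assign_zero_in_row bBest
  congr 1
  apply PySem.List.foldl_congr_mem
  intro st j hj
  rw [hcols j, hcnt j hj]
  by_cases hc : PySem.Dict.contains rowOf j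
  · simp [hc]
  · by_cases hz : PySem.List.pyGetD (PySem.List.pyGetD M t []) j 0 == 0
    · by_cases hlt : zeros_below M t j < st.2 <;> simp [hc, hz, hlt]
    · simp [hc, hz]

theorem bBest_spec (row : List Int) (n : Int) (rowOf cnt : PySem.Dict Int Int) :
    bBest row n rowOf cnt = -1 ∨
      (bBest row n rowOf cnt ∈ PySem.List.pyRange 0 n 1 ∧
       PySem.Dict.contains rowOf (bBest row n rowOf cnt) = false) := by
  unfold bBest
  apply pvFoldlInv (P := fun (st : Int × Int) => st.1 = -1 ∨
      (st.1 ∈ PySem.List.pyRange 0 n 1 ∧ PySem.Dict.contains rowOf st.1 = false))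
  · left; rfl
  · intro st j hj hP
    by_cases hg : (!(PySem.Dict.contains rowOf j) && (PySem.List.pyGetD row j 0 == 0)
           && decide (PySem.Dict.getD cnt j 0 < st.2)) = true
    · simp only [hg, if_true]
      right
      refine ⟨hj, ?_⟩
      simp at hg
      simp [hg.1.1]
    · simp only [hg, Bool.false_eq_true, if_false]
      exact hP

theorem foldl_add_nodup : ∀ (l acc : List Int), l.Nodup → (∀ x ∈ l, x ∉ acc) →
    l.foldl PySem.Set.add acc = acc ++ l := by
  intro l
  induction l with
  | nil => intro acc _ _; simp
  | cons a l ih =>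
      intro acc hnd hdisj
      rw [List.foldl_cons]
      have ha : a ∉ acc := hdisj a List.mem_cons_self
      have hadd : PySem.Set.add acc a = acc ++ [a] := by
        unfold PySem.Set.add
        simp [PySem.Set.contains, ha]
      rw [hadd, ih (acc ++ [a]) (List.nodup_cons.mp hnd).2]
      · simp
      · intro x hx
        simp only [List.mem_append, List.mem_singleton]
        rintro (h | rfl)
        · exact hdisj x (List.mem_cons_of_mem _ hx) h
        · exact (List.nodup_cons.mp hnd).1 hx

theorem ofList_nodup {l : List Int} (h : l.Nodup) : PySem.Set.ofList l = l := by
  rw [PySem.Set.ofList_eq_foldl]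
  have := foldl_add_nodup l [] h (by simp)
  simpa using this

-- phase-1 fold states after t rows
def p1A (M : List (List Int)) (t : Nat) :
    PySem.Set (Int × Int) × PySem.Set Int × PySem.Set Int × PySem.Set Int :=
  (PySem.List.pyRange 0 (t : Int) 1).foldl (assignStepA M)
    (PySem.Set.empty, PySem.Set.empty, PySem.Set.empty,
     PySem.Set.ofList (PySem.List.pyRange 0 (PySem.List.len M) 1))

def p1B (M : List (List Int)) (t : Nat) :
    PySem.Dict Int Int × PySem.Dict Int Int × PySem.Dict Int Int :=
  (PySem.List.pyRange 0 (t : Int) 1).foldl (assignStepB M (PySem.List.len M))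
    (bCounts M (PySem.List.len M), ⟨[]⟩, ⟨[]⟩)

def P1Inv (M : List (List Int)) (t : Nat) : Prop :=
  (p1A M t).1 = (p1B M t).2.2.items ∧
  (p1A M t).2.1 = (p1B M t).2.1.keys ∧
  (∀ i c : Int, ((i, c) ∈ (p1A M t).1 ↔ PySem.Dict.get? (p1B M t).2.1 c = some i)) ∧
  (p1A M t).2.2.2 = (PySem.List.pyRange 0 (PySem.List.len M) 1).filter
      (fun r => !(PySem.Dict.contains (p1B M t).2.2 r)) ∧
  (∀ j ∈ PySem.List.pyRange 0 (PySem.List.len M) 1,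
      PySem.Dict.getD (p1B M t).1 j 0 = zeros_below M ((t : Int) - 1) j) ∧
  (∀ p ∈ (p1A M t).1, p.1 ∈ PySem.List.pyRange 0 (PySem.List.len M) 1 ∧ p.1 < (t : Int) ∧
      p.2 ∈ PySem.List.pyRange 0 (PySem.List.len M) 1)

theorem p1_succ (M : List (List Int)) (t : Nat) :
    p1A M (t+1) = assignStepA M (p1A M t) (t : Int) ∧
    p1B M (t+1) = assignStepB M (PySem.List.len M) (p1B M t) (t : Int) := by
  unfold p1A p1B
  have hcast : ((t + 1 : Nat) : Int) = (t : Int) + 1 := by push_cast; ring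
  rw [hcast, PySem.List.pyRange_one_succ_right (Int.natCast_nonneg t)]
  rw [List.foldl_append, List.foldl_append]
  simp

theorem p1_zero (M : List (List Int)) : P1Inv M 0 := by
  unfold P1Inv p1A p1B
  have h0 : PySem.List.pyRange 0 ((0 : Nat) : Int) 1 = [] :=
    PySem.List.pyRange_one_eq_nil (by simp)
  rw [h0]
  simp only [List.foldl_nil]
  refine ⟨rfl, rfl, ?_, ?_, ?_, ?_⟩
  · intro i c
    constructor
    · intro h; simp [PySem.Set.empty] at h
    · intro h; simp [PySem.Dict.get?] at h
  · rw [ofList_nodup (PySem.List.nodup_pyRange_one 0 _)]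
    have : ∀ r : Int, PySem.Dict.contains (⟨[]⟩ : PySem.Dict Int Int) r = false := by
      intro r; rfl
    simp [this]
  · intro j hj
    rw [bCounts_getD M _ j hj, zeros_below_eq]
    norm_num
  · intro p hp
    simp [PySem.Set.empty] at hp

theorem p1_step (M : List (List Int)) (t : Nat) (ht : t < M.length) (ih : P1Inv M t) :
    P1Inv M (t+1) := by
  obtain ⟨ih1, ih2, ih3, ih4, ih5, ih6⟩ := ih
  obtain ⟨hA, hB⟩ := p1_succ M t
  have htn : (t : Int) < PySem.List.len M := by
    unfold PySem.List.len; exact_mod_cast ht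
  have htr : (t : Int) ∈ PySem.List.pyRange 0 (PySem.List.len M) 1 :=
    PySem.List.mem_pyRange_one.mpr ⟨Int.natCast_nonneg t, htn⟩
  have hcols : ∀ j : Int, PySem.Set.contains (p1A M t).2.1 j
      = PySem.Dict.contains (p1B M t).2.1 j := by
    intro j
    rw [ih2, Bool.eq_iff_iff]
    simp [PySem.Set.contains, PySem.Dict.contains_iff_mem_keys]
  have hcnt : ∀ j ∈ PySem.List.pyRange 0 (PySem.List.len M) 1,
      (bDecr (PySem.List.pyGetD M (t : Int) []) (PySem.List.len M) (p1B M t).1).getD j 0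
        = zeros_below M (t : Int) j := by
    intro j hj
    rw [bDecr_getD _ _ _ j hj, ih5 j hj, zb_succ M (t : Int) j htn]
    unfold zeroAt
    rfl
  have hbz : assign_zero_in_row M (t : Int) (p1A M t).2.1
      = bBest (PySem.List.pyGetD M (t : Int) []) (PySem.List.len M) (p1B M t).2.1
          (bDecr (PySem.List.pyGetD M (t : Int) []) (PySem.List.len M) (p1B M t).1) := by
    exact best_eq M (t : Int) _ _ _ hcols hcnt
  have hcast1 : ((t + 1 : Nat) : Int) - 1 = (t : Int) := by push_cast; ring
  unfold P1Inv
  rw [hA, hB]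
  unfold assignStepA assignStepB
  dsimp only
  rw [hbz]
  set b := bBest (PySem.List.pyGetD M (t : Int) []) (PySem.List.len M) (p1B M t).2.1
      (bDecr (PySem.List.pyGetD M (t : Int) []) (PySem.List.len M) (p1B M t).1) with hbdef
  by_cases hb1 : b = -1
  · simp only [hb1, bne_self_eq_false, Bool.false_eq_true, if_false]
    refine ⟨ih1, ih2, ih3, ih4, ?_, ?_⟩
    · intro j hj
      rw [hcast1]
      exact hcnt j hj
    · intro p hp
      obtain ⟨h1, h2, h3⟩ := ih6 p hp
      exact ⟨h1, by push_cast; omega, h3⟩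
  · have hbne : (b != -1) = true := by simp [hb1]
    simp only [hbne, if_true]
    rcases bBest_spec (PySem.List.pyGetD M (t : Int) []) (PySem.List.len M) (p1B M t).2.1
        (bDecr (PySem.List.pyGetD M (t : Int) []) (PySem.List.len M) (p1B M t).1)
      with h | ⟨hbr, hbc⟩
    · exact absurd (hbdef ▸ h) hb1
    · rw [← hbdef] at hbr hbc
      have hfresh1 : ((t : Int), b) ∉ (p1A M t).1 := by
        intro h
        have := (ih6 _ h).2.1
        omega
      have haddA : PySem.Set.add (p1A M t).1 ((t : Int), b)
          = (p1A M t).1 ++ [((t : Int), b)] := by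
        unfold PySem.Set.add
        simp [PySem.Set.contains, hfresh1]
      have hbkeys : b ∉ (p1B M t).2.1.keys := by
        intro h
        rw [← PySem.Dict.contains_iff_mem_keys] at h
        rw [hbc] at h
        exact absurd h (by simp)
      have haddC : PySem.Set.add (p1A M t).2.1 b = (p1A M t).2.1 ++ [b] := by
        unfold PySem.Set.add
        rw [ih2]
        simp [PySem.Set.contains, hbkeys]
      have hcontC : PySem.Dict.contains (p1B M t).2.2 (t : Int) = false := by
        rw [Bool.eq_false_iff]
        intro h
        unfold PySem.Dict.contains at h
        rw [List.any_eq_true] at h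
        obtain ⟨p, hp, hpt⟩ := h
        rw [← ih1] at hp
        have h1 := (ih6 p hp).2.1
        have h2 : p.1 = (t : Int) := by simpa using hpt
        omega
      have hitems : (PySem.Dict.insert (p1B M t).2.2 (t : Int) b).items
          = (p1B M t).2.2.items ++ [((t : Int), b)] :=
        PySem.Dict.items_insert_of_not_contains _ _ hcontC
      have hkeys2 : (PySem.Dict.insert (p1B M t).2.1 b (t : Int)).keys
          = (p1B M t).2.1.keys ++ [b] :=
        PySem.Dict.keys_insert_of_not_contains _ _ hbc
      have hnone : (p1B M t).2.1.get? b = none :=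
        (PySem.Dict.get?_eq_none_iff_contains _ _).mpr hbc
      have htru : (t : Int) ∈ (p1A M t).2.2.2 := by
        rw [ih4]
        exact List.mem_filter.mpr ⟨htr, by simp [hcontC]⟩
      have hremove : (PySem.Set.remove? (p1A M t).2.2.2 (t : Int)).getD (p1A M t).2.2.2
          = (p1A M t).2.2.2.filter (fun y => !(y == (t : Int))) := by
        unfold PySem.Set.remove? PySem.Set.discard
        simp [PySem.Set.contains, htru]
      refine ⟨?_, ?_, ?_, ?_, ?_, ?_⟩
      · rw [haddA, hitems, ih1]
      · rw [haddC, hkeys2, ih2]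
      · intro i c
        rw [haddA, PySem.Dict.get?_insert]
        by_cases hcb : c = b
        · subst hcb
          simp only [List.mem_append, List.mem_singleton, Prod.mk.injEq]
          rw [ih3 i b, hnone]
          simp [eq_comm]
        · simp only [if_neg hcb, List.mem_append, List.mem_singleton, Prod.mk.injEq]
          rw [ih3 i c]
          simp [hcb]
      · rw [hremove, ih4, List.filter_filter]
        congr 1
        funext r
        rw [PySem.Dict.contains_insert]
        simp
      · intro j hj
        rw [hcast1]
        exact hcnt j hj
      · intro p hp
        rw [haddA] at hp
        rcases List.mem_append.mp hp with h | h
        · obtain ⟨h1, h2, h3⟩ := ih6 p h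
          exact ⟨h1, by push_cast; omega, h3⟩
        · have hpeq : p = ((t : Int), b) := by simpa using h
          subst hpeq
          exact ⟨htr, by push_cast; omega, hbr⟩

theorem phase1_inv (M : List (List Int)) : ∀ t : Nat, t ≤ M.length → P1Inv M t := by
  intro t
  induction t with
  | zero => intro _; exact p1_zero M
  | succ t ih => intro h; exact p1_step M t (by omega) (ih (by omega))

-- ===== VERDICT (by name: the statement is the Claim_ definition above) =====
theorem cover_zeros_spec : Claim_equal_cover_zeros := by
  intro M _ _
  unfold Spec_cover_zeros
  unfold cover_zeros cover_zeros_alt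
  dsimp only
  have eA : (PySem.List.pyRange 0 (PySem.List.len M) 1).foldl (assignStepA M)
      (PySem.Set.empty, PySem.Set.empty, PySem.Set.empty,
       PySem.Set.ofList (PySem.List.pyRange 0 (PySem.List.len M) 1)) = p1A M M.length := rfl
  have eB : (PySem.List.pyRange 0 (PySem.List.len M) 1).foldl
      (assignStepB M (PySem.List.len M)) (bCounts M (PySem.List.len M), ⟨[]⟩, ⟨[]⟩)
      = p1B M M.length := rfl
  rw [eA, eB]
  obtain ⟨h1, h2, h3, h4, h5, h6⟩ := phase1_inv M M.length le_rfl
  rw [← h4]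
  have hm : loopA M (PySem.List.len M) (p1A M M.length).1 (coverFuel M)
        (p1A M M.length).2.2.2 PySem.Set.empty
      = loopB M (p1B M M.length).2.1 (coverFuel M)
        (p1A M M.length).2.2.2 [] (p1A M M.length).2.2.2 := by
    have := loop_eq M (PySem.List.len M) (p1A M M.length).1 (p1B M M.length).2.1
      h3 (fun i c h => (h6 (i, c) h).1) (coverFuel M) [] (p1A M M.length).2.2.2 []
      (by intro r hr; cases hr) (by intro c hc; cases hc)
    simpa using this
  rw [hm, h1]
  rfl
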